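-- pv_equiv track=rewrite | github.com/benburda/nyt-connections-thesis | solver/feedback.py | simulate_feedback
-- ===== SOURCE A (Python) =====
-- def simulate_feedback(guess, true_groups):
--     """
--     Simulate NYT feedback for a guess given the true solution.
--
--     Args:
--         guess: list of 4 words
--         true_groups: list of dicts with "members" key
--
--     Returns:
--         "correct", "one_away", or "incorrect"
--     """
--     guess_set = frozenset(guess)
--     true_sets = [frozenset(g["members"]) for g in true_groups]
--
--     # check if correct
--     if guess_set in true_sets:
--         return "correct"
--
--     # check if one away
--     for true_set in true_sets:
--         if len(guess_set & true_set) == 3: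
--             return "one_away"
--
--     return "incorrect"
-- ===== SOURCE B (Python) =====
-- def simulate_feedback(guess, true_groups):
--     gs = frozenset(guess)
--     one_away = False
--     for g in true_groups:
--         t = frozenset(g["members"])
--         if gs == t:
--             return "correct"
--         if len(gs & t) == 3:
--             one_away = True
--     return "one_away" if one_away else "incorrect"
-- ===== Notes on version B (the rewrite author's own statement) =====
-- stated objective: alternative
-- what changed: Replaces A's two sequential passes (build all true frozensets, membership test for 'correct', then a second overlap scan) with a single loop over true_groups that builds each frozenset once, returns 'correct' on equality, and maintains a one_away flag resolved after the loop.
import Mathlib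
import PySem

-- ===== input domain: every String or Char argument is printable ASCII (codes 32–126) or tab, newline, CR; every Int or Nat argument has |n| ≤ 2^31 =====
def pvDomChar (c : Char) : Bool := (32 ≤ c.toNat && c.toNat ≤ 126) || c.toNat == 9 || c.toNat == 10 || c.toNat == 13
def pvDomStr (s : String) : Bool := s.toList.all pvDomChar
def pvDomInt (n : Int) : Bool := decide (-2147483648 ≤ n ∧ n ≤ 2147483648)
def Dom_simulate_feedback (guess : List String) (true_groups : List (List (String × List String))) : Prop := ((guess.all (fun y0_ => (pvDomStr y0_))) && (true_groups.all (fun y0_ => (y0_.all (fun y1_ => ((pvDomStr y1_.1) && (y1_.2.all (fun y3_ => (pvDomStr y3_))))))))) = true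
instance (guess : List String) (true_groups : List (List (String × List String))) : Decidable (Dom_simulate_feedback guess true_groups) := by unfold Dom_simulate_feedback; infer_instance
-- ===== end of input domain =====

-- B replaces A's two sequential passes (frozenset list + membership test, then overlap scan) with a single flagged loop over true_groups (alternative decomposition, same cost).


-- ===== PORT A =====
-- A: two passes over the precomputed frozensets — membership test for "correct", then an overlap scan.
def pvTrueSet (g : List (String × List String)) : PySem.Set String :=
  PySem.Set.ofList ((PySem.Dict.mk g).getD "members" [])

def pvOneAwayScan (gs : PySem.Set String) : List (PySem.Set String) → String
  | [] => "incorrect"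
  | t :: rest =>
      if PySem.Set.len (PySem.Set.inter gs t) == (3 : Int) then "one_away"
      else pvOneAwayScan gs rest

def simulate_feedback (guess : List String) (true_groups : List (List (String × List String))) : String :=
  let gs := PySem.Set.ofList guess
  let ts := true_groups.map pvTrueSet
  if ts.any (fun t => PySem.Set.equal gs t) then "correct"
  else pvOneAwayScan gs ts

-- ===== PORT B =====
-- B: one loop over true_groups with a one_away flag; equality returns "correct" immediately.
def pvFeedbackLoop (gs : PySem.Set String) (groups : List (List (String × List String))) (flag : Bool) : String :=
  match groups with
  | [] => if flag then "one_away" else "incorrect"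
  | g :: rest =>
      let t := PySem.Set.ofList ((PySem.Dict.mk g).getD "members" [])
      if PySem.Set.equal gs t then "correct"
      else pvFeedbackLoop gs rest (flag || (PySem.Set.len (PySem.Set.inter gs t) == (3 : Int)))

def simulate_feedback_alt (guess : List String) (true_groups : List (List (String × List String))) : String :=
  pvFeedbackLoop (PySem.Set.ofList guess) true_groups false

-- ===== PRECONDITION & SPEC =====
-- Pre_ excludes groups without a "members" key, on which Python A raises KeyError.
def Pre_simulate_feedback (guess : List String) (true_groups : List (List (String × List String))) : Prop :=
  (true_groups.all (fun g => (PySem.Dict.mk g).contains "members")) = true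
instance (guess : List String) (true_groups : List (List (String × List String))) : Decidable (Pre_simulate_feedback guess true_groups) := by unfold Pre_simulate_feedback; infer_instance
def pvWitness_simulate_feedback : List String × (List (List (String × List String))) :=
  (["a", "b", "c", "d"], [[("members", ["a", "b", "c", "x"])], [("members", ["p", "q", "r", "s"])]])
def Spec_simulate_feedback (guess : List String) (true_groups : List (List (String × List String))) (out : String) : Prop := out = simulate_feedback_alt guess true_groups
instance (guess : List String) (true_groups : List (List (String × List String))) (out : String) : Decidable (Spec_simulate_feedback guess true_groups out) := by unfold Spec_simulate_feedback; infer_instance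

-- ===== CLAIM (what is proved, stated in full; the proofs are below) =====
def Claim_equal_simulate_feedback : Prop := ∀ (guess : List String) (true_groups : List (List (String × List String))), Dom_simulate_feedback guess true_groups → Pre_simulate_feedback guess true_groups → Spec_simulate_feedback guess true_groups (simulate_feedback guess true_groups)

-- ===== LEMMAS AND PROOFS =====
lemma pvFeedbackLoop_eq (gs : PySem.Set String) (groups : List (List (String × List String))) (flag : Bool) :
    pvFeedbackLoop gs groups flag =
      if (groups.map pvTrueSet).any (fun t => PySem.Set.equal gs t) then "correct"
      else if flag then "one_away" else pvOneAwayScan gs (groups.map pvTrueSet) := by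
  induction groups generalizing flag with
  | nil => cases flag <;> simp [pvFeedbackLoop, pvOneAwayScan]
  | cons g rest ih =>
      have hg : PySem.Set.ofList ((PySem.Dict.mk g).getD "members" []) = pvTrueSet g := rfl
      simp only [pvFeedbackLoop, List.map_cons, List.any_cons, pvOneAwayScan, hg]
      cases he : PySem.Set.equal gs (pvTrueSet g) with
      | true => simp only [Bool.true_or, if_true]
      | false =>
          simp only [Bool.false_or, Bool.false_eq_true, if_false]
          rw [ih]
          cases hc : (PySem.Set.len (PySem.Set.inter gs (pvTrueSet g)) == (3 : Int)) with
          | true => cases flag <;> simp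
          | false => cases flag <;> simp

-- ===== VERDICT (by name: the statement is the Claim_ definition above) =====
theorem simulate_feedback_spec : Claim_equal_simulate_feedback := by
  intro guess true_groups _ _
  unfold Spec_simulate_feedback simulate_feedback simulate_feedback_alt
  rw [pvFeedbackLoop_eq]
  simp
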